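-- pv_equiv track=rewrite | github.com/getbeton/openclaw-gtm-skills | scripts/run_research.py | select_pages
-- ===== SOURCE A (Python) =====
-- MAX_PAGES = 10
--
-- HIGH_VALUE_PATTERNS = [
--     "/pricing", "/about", "/about-us", "/customers", "/case-studies",
--     "/success-stories", "/product", "/features", "/platform",
--     "/how-it-works", "/solutions", "/integrations",
-- ]
--
-- SKIP_PATTERNS = [
--     "/blog/", "/privacy", "/terms", "/gdpr", "/cookie",
--     "/login", "/signin", "/app/", "/dashboard/", "/press",
--     "/news/page", "/careers",
-- ]
--
-- def score_url(url: str) -> int: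
--     """Higher = more valuable. Returns priority score for a URL."""
--     path = url.lower().split("?")[0]
--     # Skip patterns
--     for skip in SKIP_PATTERNS:
--         if skip in path:
--             return -1
--     # High-value exact matches
--     for i, pattern in enumerate(HIGH_VALUE_PATTERNS):
--         if path.rstrip("/").endswith(pattern) or f"{pattern}/" in path:
--             return len(HIGH_VALUE_PATTERNS) - i  # higher score for earlier in list
--     return 0
--
-- def select_pages(sitemap_urls: list[str], domain: str) -> list[str]:
--     """Pick up to MAX_PAGES most relevant URLs from sitemap."""
--     homepage = f"https://{domain}"
--     scored = []
--     for url in sitemap_urls: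
--         s = score_url(url)
--         if s >= 0:
--             scored.append((s, url))
--     # Sort descending by score
--     scored.sort(key=lambda x: -x[0])
--     # Always include homepage
--     selected = [homepage]
--     seen = {homepage}
--     for score, url in scored:
--         if len(selected) >= MAX_PAGES:
--             break
--         normalized = url.rstrip("/")
--         if normalized not in seen and url not in seen:
--             selected.append(url)
--             seen.add(normalized)
--     return selected
-- ===== SOURCE B (Python) =====
-- MAX_PAGES = 10
--
-- HIGH_VALUE_PATTERNS = [
--     "/pricing", "/about", "/about-us", "/customers", "/case-studies",
--     "/success-stories", "/product", "/features", "/platform",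
--     "/how-it-works", "/solutions", "/integrations",
-- ]
--
-- SKIP_PATTERNS = [
--     "/blog/", "/privacy", "/terms", "/gdpr", "/cookie",
--     "/login", "/signin", "/app/", "/dashboard/", "/press",
--     "/news/page", "/careers",
-- ]
--
-- def score_url(url: str) -> int:
--     """Higher = more valuable. Returns priority score for a URL."""
--     path = url.lower().split("?")[0]
--     for skip in SKIP_PATTERNS:
--         if skip in path:
--             return -1
--     for i, pattern in enumerate(HIGH_VALUE_PATTERNS):
--         if path.rstrip("/").endswith(pattern) or f"{pattern}/" in path:
--             return len(HIGH_VALUE_PATTERNS) - i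
--     return 0
--
-- def select_pages(sitemap_urls: list[str], domain: str) -> list[str]:
--     """Pick up to MAX_PAGES most relevant URLs: no sort — bucket each URL by
--     its score, then read the buckets from the highest score down to 0, which
--     keeps the stable descending order."""
--     homepage = f"https://{domain}"
--     buckets = [[] for _ in range(len(HIGH_VALUE_PATTERNS) + 1)]
--     for url in sitemap_urls:
--         s = score_url(url)
--         if s >= 0:
--             buckets[s].append(url)
--     candidates = []
--     for s in range(len(HIGH_VALUE_PATTERNS), -1, -1):
--         candidates.extend(buckets[s])
--     selected = [homepage]
--     seen = {homepage}
--     for url in candidates: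
--         if len(selected) >= MAX_PAGES:
--             break
--         normalized = url.rstrip("/")
--         if normalized not in seen and url not in seen:
--             selected.append(url)
--             seen.add(normalized)
--     return selected
-- ===== Notes on version B (the rewrite author's own statement) =====
-- stated objective: alternative
-- what changed: select_pages no longer builds (score,url) pairs and stable-sorts them: B appends each qualifying URL to a bucket indexed by its score, then flattens the buckets from the highest score (12) down to 0 — which reproduces the stable descending order without a sort — and runs the same homepage-seed/dedup/cap selection loop.
import Mathlib
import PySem

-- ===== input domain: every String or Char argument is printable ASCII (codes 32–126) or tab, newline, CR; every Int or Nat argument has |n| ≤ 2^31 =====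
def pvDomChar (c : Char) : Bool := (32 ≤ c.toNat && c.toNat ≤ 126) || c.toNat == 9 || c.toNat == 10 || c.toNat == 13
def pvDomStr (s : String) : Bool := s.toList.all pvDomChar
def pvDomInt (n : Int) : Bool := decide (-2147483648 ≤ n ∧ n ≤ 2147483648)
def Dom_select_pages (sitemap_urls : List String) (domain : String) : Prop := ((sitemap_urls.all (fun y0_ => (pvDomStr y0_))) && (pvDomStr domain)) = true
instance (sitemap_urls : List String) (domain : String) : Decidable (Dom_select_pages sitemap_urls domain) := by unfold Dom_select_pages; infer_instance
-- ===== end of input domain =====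

-- B replaces A's build-pairs-and-stable-sort by a counting/bucket pass (append each
-- qualifying URL to the bucket of its score, flatten buckets from score 12 down to 0),
-- which yields the same ordered candidate list; the selection loop is unchanged. Objective: alternative.

-- ===== PORT A =====
-- shared module constants and the helper score_url (identical in A and B)
def pvHV : List String :=
  ["/pricing", "/about", "/about-us", "/customers", "/case-studies",
   "/success-stories", "/product", "/features", "/platform",
   "/how-it-works", "/solutions", "/integrations"]

def pvSkip : List String :=
  ["/blog/", "/privacy", "/terms", "/gdpr", "/cookie",
   "/login", "/signin", "/app/", "/dashboard/", "/press",
   "/news/page", "/careers"]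

-- hand port of url.rstrip("/") (PySem has no rstrip-with-chars): drop trailing '/' characters; exact
def pvRstripSlash (s : String) : String :=
  String.ofList ((s.toList.reverse.dropWhile (fun c => c == '/')).reverse)

-- path = url.lower().split("?")[0]  (sep "?" is non-empty, so split? is always some)
def pvPath (url : String) : String :=
  ((PySem.Str.split? (PySem.Str.lower url) "?").getD []).headD ""

def pvScoreUrl (url : String) : Int :=
  let path := pvPath url
  if pvSkip.any (fun skip => PySem.Str.isIn skip path) then -1
  else
    match (PySem.List.enumerate pvHV).find?
        (fun p => PySem.Str.endswith (pvRstripSlash path) p.2 || PySem.Str.isIn (p.2 ++ "/") path) with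
    | some p => 12 - p.1
    | none => 0

-- one step of A's selection loop (break modelled as a no-op once the cap is reached)
def pvStepA (p : List String × PySem.Set String) (su : Int × String) : List String × PySem.Set String :=
  if 10 ≤ p.1.length then p
  else
    let normalized := pvRstripSlash su.2
    if !(PySem.Set.contains p.2 normalized) && !(PySem.Set.contains p.2 su.2) then
      (p.1 ++ [su.2], PySem.Set.add p.2 normalized)
    else p

def select_pages (sitemap_urls : List String) (domain : String) : List String :=
  let homepage := "https://" ++ domain
  let scored := sitemap_urls.foldl
    (fun acc url => if 0 ≤ pvScoreUrl url then acc ++ [(pvScoreUrl url, url)] else acc)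
    ([] : List (Int × String))
  let sortd := PySem.List.sorted scored (fun x => -x.1)
  (sortd.foldl pvStepA ([homepage], PySem.Set.ofList [homepage])).1

-- ===== PORT B =====
-- Source B's own copy of the helper score_url (textually the same function as A's)
def pvScoreUrlB (url : String) : Int :=
  let path := pvPath url
  if pvSkip.any (fun skip => PySem.Str.isIn skip path) then -1
  else
    match (PySem.List.enumerate pvHV).find?
        (fun p => PySem.Str.endswith (pvRstripSlash path) p.2 || PySem.Str.isIn (p.2 ++ "/") path) with
    | some p => 12 - p.1
    | none => 0

-- one step of B's bucketing pass; the index s.toNat is exact: it is only taken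
-- under the guard 0 ≤ s, and score_url's values lie in 0..12 = len(buckets)-1
def pvBucketAdd (bks : List (List String)) (url : String) : List (List String) :=
  let s := pvScoreUrlB url
  if 0 ≤ s then bks.set s.toNat ((bks.getD s.toNat []) ++ [url]) else bks

-- B's selection loop over the flattened candidate list ('break' = stop)
def pvSelLoop : List String → List String → PySem.Set String → List String
  | [], selected, _ => selected
  | url :: rest, selected, seen =>
    if 10 ≤ selected.length then selected
    else
      let normalized := pvRstripSlash url
      if !(PySem.Set.contains seen normalized) && !(PySem.Set.contains seen url) then
        pvSelLoop rest (selected ++ [url]) (PySem.Set.add seen normalized)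
      else pvSelLoop rest selected seen

def select_pages_alt (sitemap_urls : List String) (domain : String) : List String :=
  let homepage := "https://" ++ domain
  let buckets := sitemap_urls.foldl pvBucketAdd (List.replicate 13 [])
  let candidates := (PySem.List.pyRange 12 (-1) (-1)).flatMap
    (fun s => buckets.getD s.toNat [])
  pvSelLoop candidates [homepage] (PySem.Set.ofList [homepage])

-- ===== PRECONDITION & SPEC =====
def Spec_select_pages (sitemap_urls : List String) (domain : String) (out : List String) : Prop := out = select_pages_alt sitemap_urls domain
instance (sitemap_urls : List String) (domain : String) (out : List String) : Decidable (Spec_select_pages sitemap_urls domain out) := by unfold Spec_select_pages; infer_instance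

-- ===== CLAIM (what is proved, stated in full; the proofs are below) =====
def Claim_equal_select_pages : Prop := ∀ (sitemap_urls : List String) (domain : String), Dom_select_pages sitemap_urls domain → Spec_select_pages sitemap_urls domain (select_pages sitemap_urls domain)

-- ===== LEMMAS AND PROOFS =====

-- the descending score levels A's sort stratifies into
def pvLevels : List Int := PySem.List.pyRange 12 (-1) (-1)

theorem pvScoreUrlB_eq : pvScoreUrlB = pvScoreUrl := rfl

-- the candidate list stratified by score level, highest first
def pvBuckets (levels : List Int) (l : List (Int × String)) : List (Int × String) :=
  levels.flatMap (fun s => l.filter (fun x => x.1 == s))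

theorem pvLevels_eq : pvLevels = [12,11,10,9,8,7,6,5,4,3,2,1,0] := by decide

theorem pvScoreUrl_bounds (url : String) : -1 ≤ pvScoreUrl url ∧ pvScoreUrl url ≤ 12 := by
  unfold pvScoreUrl
  dsimp only
  split
  · omega
  · cases hf : (PySem.List.enumerate pvHV).find?
        (fun p => PySem.Str.endswith (pvRstripSlash (pvPath url)) p.2
          || PySem.Str.isIn (p.2 ++ "/") (pvPath url)) with
    | none => clear hf; norm_num
    | some p =>
      have hm := List.mem_of_find?_eq_some hf
      have : p.1 ∈ (PySem.List.enumerate pvHV).map Prod.fst := List.mem_map_of_mem hm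
      have h12 : 0 ≤ p.1 ∧ p.1 ≤ 11 := by
        have he : (PySem.List.enumerate pvHV).map Prod.fst = [0,1,2,3,4,5,6,7,8,9,10,11] := by decide
        rw [he] at this; simp at this; omega
      clear hf; simp only []; constructor <;> omega

theorem pv_scored_eq (sitemap_urls : List String) :
    sitemap_urls.foldl
      (fun acc url => if 0 ≤ pvScoreUrl url then acc ++ [(pvScoreUrl url, url)] else acc)
      ([] : List (Int × String))
    = (sitemap_urls.filter (fun u => decide (0 ≤ pvScoreUrl u))).map (fun u => (pvScoreUrl u, u)) := by
  simpa using PySem.List.foldl_append_if (fun u => decide (0 ≤ pvScoreUrl u))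
    (fun u => (pvScoreUrl u, u)) sitemap_urls []

theorem pv_insertBy_skip (bef : (Int × String) → (Int × String) → Bool) (x : Int × String)
    (F R : List (Int × String)) (hF : ∀ y ∈ F, bef x y = false) :
    PySem.List.insertBy bef x (F ++ R) = F ++ PySem.List.insertBy bef x R := by
  induction F with
  | nil => rfl
  | cons y F ih =>
    have hy : bef x y = false := hF y (by simp)
    simp only [List.cons_append, PySem.List.insertBy, hy]
    simp only [Bool.false_eq_true, if_false]
    rw [ih (fun z hz => hF z (by simp [hz]))]

theorem pv_insertBy_head (bef : (Int × String) → (Int × String) → Bool) (x : Int × String)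
    (R : List (Int × String)) (hR : ∀ y ∈ R, bef x y = true) :
    PySem.List.insertBy bef x R = x :: R := by
  cases R with
  | nil => rfl
  | cons y R' => simp [PySem.List.insertBy, hR y (by simp)]

theorem pvBuckets_append_notmem (levels : List Int) (l : List (Int × String)) (x : Int × String)
    (hx : x.1 ∉ levels) : pvBuckets levels (l ++ [x]) = pvBuckets levels l := by
  unfold pvBuckets
  refine List.flatMap_congr (fun s hs => ?_)
  have hne : x.1 ≠ s := fun h => hx (h ▸ hs)
  rw [List.filter_append]
  simp [hne]

theorem pv_mem_buckets_score (levels : List Int) (l : List (Int × String)) (y : Int × String)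
    (hy : y ∈ pvBuckets levels l) : y.1 ∈ levels := by
  unfold pvBuckets at hy
  rw [List.mem_flatMap] at hy
  obtain ⟨s, hs, hmem⟩ := hy
  rw [List.mem_filter] at hmem
  have : y.1 = s := by simpa using hmem.2
  exact this ▸ hs

theorem pv_insert_buckets (levels : List Int) (hdec : levels.Pairwise (· > ·))
    (x : Int × String) (hx : x.1 ∈ levels) (l : List (Int × String)) :
    PySem.List.insertBy (fun a b => decide ((fun z : Int × String => -z.1) a < (fun z : Int × String => -z.1) b)) x (pvBuckets levels l)
      = pvBuckets levels (l ++ [x]) := by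
  induction levels with
  | nil => cases hx
  | cons t rest ih =>
    rw [List.pairwise_cons] at hdec
    obtain ⟨ht, hrest⟩ := hdec
    have htr : t ∉ rest := fun h => lt_irrefl t (ht t h)
    simp only [pvBuckets, List.flatMap_cons] at *
    by_cases hxt : x.1 = t
    · have hF : ∀ y ∈ l.filter (fun y => y.1 == t),
          (fun a b => decide ((fun z : Int × String => -z.1) a < (fun z : Int × String => -z.1) b)) x y = false := by
        intro y hy
        have : y.1 = t := by simpa using (List.mem_filter.mp hy).2
        simp only [decide_eq_false_iff_not]
        omega
      rw [pv_insertBy_skip _ _ _ _ hF]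
      have hR : ∀ y ∈ rest.flatMap (fun s => l.filter (fun x => x.1 == s)),
          (fun a b => decide ((fun z : Int × String => -z.1) a < (fun z : Int × String => -z.1) b)) x y = true := by
        intro y hy
        have hys : y.1 ∈ rest := pv_mem_buckets_score rest l y hy
        have : y.1 < t := ht y.1 hys
        simp only [decide_eq_true_eq]
        omega
      rw [pv_insertBy_head _ _ _ hR]
      have hnr : x.1 ∉ rest := by rw [hxt]; exact htr
      have hbr := pvBuckets_append_notmem rest l x hnr
      simp only [pvBuckets] at hbr
      rw [List.filter_append, hbr]
      have : List.filter (fun y => y.1 == t) [x] = [x] := by simp [hxt]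
      rw [this]
      simp
    · have hxr : x.1 ∈ rest := by
        cases List.mem_cons.mp hx with
        | inl h => exact absurd h hxt
        | inr h => exact h
      have hlt : x.1 < t := ht x.1 hxr
      have hF : ∀ y ∈ l.filter (fun y => y.1 == t),
          (fun a b => decide ((fun z : Int × String => -z.1) a < (fun z : Int × String => -z.1) b)) x y = false := by
        intro y hy
        have : y.1 = t := by simpa using (List.mem_filter.mp hy).2
        simp only [decide_eq_false_iff_not]
        omega
      rw [pv_insertBy_skip _ _ _ _ hF]
      rw [ih hrest hxr]
      rw [List.filter_append]
      have : List.filter (fun y => y.1 == t) [x] = [] := by simp [hxt]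
      rw [this]
      simp

theorem pv_sorted_eq_buckets (l : List (Int × String))
    (hb : ∀ x ∈ l, 0 ≤ x.1 ∧ x.1 ≤ 12) :
    PySem.List.sorted l (fun x => -x.1) = pvBuckets pvLevels l := by
  induction l using List.reverseRecOn with
  | nil =>
    rw [PySem.List.sorted_eq_foldl_insertBy]
    simp [pvBuckets]
  | append_singleton l x ih =>
    rw [PySem.List.sorted_eq_foldl_insertBy, List.foldl_append]
    simp only [List.foldl_cons, List.foldl_nil]
    rw [← PySem.List.sorted_eq_foldl_insertBy,
        ih (fun y hy => hb y (List.mem_append_left _ hy))]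
    have hx := hb x (List.mem_append_right _ (by simp))
    have hxm : x.1 ∈ pvLevels := by
      rw [pvLevels_eq]
      have h0 := hx.1
      have h12 := hx.2
      simp only [List.mem_cons, List.not_mem_nil, or_false]
      omega
    exact pv_insert_buckets pvLevels (by rw [pvLevels_eq]; decide) x hxm l

theorem pv_foldl_stepA_full (ps : List (Int × String)) (sel : List String) (seen : PySem.Set String)
    (h : 10 ≤ sel.length) : ps.foldl pvStepA (sel, seen) = (sel, seen) := by
  induction ps with
  | nil => rfl
  | cons p ps ih => simp only [List.foldl_cons, pvStepA, h, if_pos]; exact ih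

theorem pv_sel_eq (ps : List (Int × String)) (sel : List String) (seen : PySem.Set String) :
    (ps.foldl pvStepA (sel, seen)).1 = pvSelLoop (ps.map Prod.snd) sel seen := by
  induction ps generalizing sel seen with
  | nil => rfl
  | cons p ps ih =>
    simp only [List.foldl_cons, List.map_cons, pvSelLoop]
    by_cases h : 10 ≤ sel.length
    · rw [if_pos h]
      have hstep : pvStepA (sel, seen) p = (sel, seen) := by unfold pvStepA; rw [if_pos h]
      rw [hstep, pv_foldl_stepA_full ps sel seen h]
    · rw [if_neg h]
      unfold pvStepA
      rw [if_neg h]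
      dsimp only
      split
      · exact ih _ _
      · exact ih _ _

theorem pv_candidates_eq (sitemap_urls : List String) :
    (pvBuckets pvLevels ((sitemap_urls.filter (fun u => decide (0 ≤ pvScoreUrl u))).map
        (fun u => (pvScoreUrl u, u)))).map Prod.snd
      = (PySem.List.pyRange 12 (-1) (-1)).flatMap
          (fun s => sitemap_urls.filter (fun url => pvScoreUrl url == s)) := by
  unfold pvBuckets
  rw [List.map_flatMap]
  show List.flatMap _ pvLevels = List.flatMap _ pvLevels
  refine List.flatMap_congr (fun s hs => ?_)
  have h0s : 0 ≤ s := by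
    rw [pvLevels_eq] at hs
    simp only [List.mem_cons, List.not_mem_nil, or_false] at hs
    omega
  rw [List.filter_map, List.map_map]
  have : (Prod.snd ∘ fun u => (pvScoreUrl u, u)) = id := rfl
  rw [this, List.map_id, List.filter_filter]
  refine List.filter_congr (fun u _ => ?_)
  by_cases hb : pvScoreUrl u == s
  · have : pvScoreUrl u = s := by simpa using hb
    simp [Function.comp, this, h0s]
  · simp [Function.comp, hb]

theorem pv_bucket_fold (l : List String) :
    ∀ (bks : List (List String)), bks.length = 13 →
      (l.foldl pvBucketAdd bks).length = 13 ∧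
      ∀ k : Nat, k < 13 →
        (l.foldl pvBucketAdd bks).getD k []
          = bks.getD k [] ++ l.filter (fun u => pvScoreUrlB u == (k : Int)) := by
  induction l with
  | nil => exact fun bks h => ⟨h, fun k _ => by simp⟩
  | cons u l ih =>
    intro bks h
    have hb : -1 ≤ pvScoreUrlB u ∧ pvScoreUrlB u ≤ 12 := by
      rw [pvScoreUrlB_eq]; exact pvScoreUrl_bounds u
    simp only [List.foldl_cons]
    by_cases h0 : 0 ≤ pvScoreUrlB u
    · have hstep : pvBucketAdd bks u
          = bks.set (pvScoreUrlB u).toNat ((bks.getD (pvScoreUrlB u).toNat []) ++ [u]) := by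
        unfold pvBucketAdd; rw [if_pos h0]
      have hlen : (pvBucketAdd bks u).length = 13 := by rw [hstep, List.length_set, h]
      obtain ⟨hl, hk⟩ := ih (pvBucketAdd bks u) hlen
      refine ⟨hl, fun k hk13 => ?_⟩
      rw [hk k hk13, hstep]
      by_cases hek : (pvScoreUrlB u).toNat = k
      · have heq : (pvScoreUrlB u == (k : Int)) = true := by
          simp only [beq_iff_eq]; omega
        have hlt : (pvScoreUrlB u).toNat < bks.length := by rw [h]; omega
        rw [hek] at hlt ⊢
        simp [heq, List.getD, List.getElem?_set_self hlt]
      · have heq : (pvScoreUrlB u == (k : Int)) = false := by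
          simp only [beq_eq_false_iff_ne, ne_eq]; omega
        simp [heq, List.getD, List.getElem?_set_ne hek]
    · have hstep : pvBucketAdd bks u = bks := by unfold pvBucketAdd; rw [if_neg h0]
      rw [hstep]
      obtain ⟨hl, hk⟩ := ih bks h
      refine ⟨hl, fun k hk13 => ?_⟩
      have heq : (pvScoreUrlB u == (k : Int)) = false := by
        simp only [beq_eq_false_iff_ne, ne_eq]; omega
      rw [hk k hk13]
      simp [heq]

theorem pv_candidatesB_eq (sitemap_urls : List String) :
    (PySem.List.pyRange 12 (-1) (-1)).flatMap
        (fun s => (sitemap_urls.foldl pvBucketAdd (List.replicate 13 [])).getD s.toNat [])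
      = (PySem.List.pyRange 12 (-1) (-1)).flatMap
          (fun s => sitemap_urls.filter (fun url => pvScoreUrl url == s)) := by
  refine List.flatMap_congr (fun s hs => ?_)
  have hs' : 0 ≤ s ∧ s ≤ 12 := by
    have : s ∈ pvLevels := hs
    rw [pvLevels_eq] at this
    simp only [List.mem_cons, List.not_mem_nil, or_false] at this
    omega
  have hk : s.toNat < 13 := by omega
  obtain ⟨-, hbk⟩ := pv_bucket_fold sitemap_urls (List.replicate 13 []) (by simp)
  rw [hbk s.toNat hk]
  have h1 : (List.replicate 13 ([] : List String)).getD s.toNat [] = [] := by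
    rw [List.getD_eq_getElem?_getD, List.getElem?_replicate]
    simp [hk]
  rw [h1, List.nil_append, Int.toNat_of_nonneg hs'.1, pvScoreUrlB_eq]

theorem pv_scored_bounds (sitemap_urls : List String) :
    ∀ x ∈ (sitemap_urls.filter (fun u => decide (0 ≤ pvScoreUrl u))).map
      (fun u => (pvScoreUrl u, u)), 0 ≤ x.1 ∧ x.1 ≤ 12 := by
  intro x hx
  simp only [List.mem_map, List.mem_filter] at hx
  obtain ⟨u, ⟨hu, h0⟩, hxu⟩ := hx
  have hb := pvScoreUrl_bounds u
  have h1 : x.1 = pvScoreUrl u := by rw [← hxu]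
  rw [h1]
  exact ⟨of_decide_eq_true h0, hb.2⟩


-- ===== VERDICT (by name: the statement is the Claim_ definition above) =====
set_option maxHeartbeats 1000000 in
theorem select_pages_spec : Claim_equal_select_pages := by
  intro sitemap_urls domain _hdom
  simp only [Spec_select_pages, select_pages, select_pages_alt]
  rw [pv_scored_eq]
  rw [pv_sorted_eq_buckets _ (pv_scored_bounds sitemap_urls)]
  rw [pv_sel_eq, pv_candidates_eq, pv_candidatesB_eq]
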